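-- pv_equiv track=rewrite | github.com/FabianMenekshi/LLMs_Robustness_Under_Distractions | src/validation.py | validate_minimum_instruction_diversity
-- ===== SOURCE A (Python) =====
-- from typing import List, Dict, Any, Tuple
--
-- EXPECTED_TASK_NAMES = {
--     "single_label_classification",
--     "multi_label_classification",
--     "information_extraction",
--     "rule_based_transformation",
--     "extractive_qa",
-- }
--
-- def validate_minimum_instruction_diversity(
--     records: List[Dict[str, Any]],
--     min_unique_per_task: int = 4,
-- ) -> List[str]:
--     issues = []
--     instructions_by_task: Dict[str, set] = {}
--
--     for record in records:
--         instructions_by_task.setdefault(record["task_name"], set()).add(record["instruction"])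
--
--     for task_name in EXPECTED_TASK_NAMES:
--         observed = len(instructions_by_task.get(task_name, set()))
--         if observed < min_unique_per_task:
--             issues.append(
--                 f"instruction_diversity_too_low:{task_name}:minimum={min_unique_per_task}:observed={observed}"
--             )
--
--     return issues
-- ===== SOURCE B (Python) =====
-- from typing import List, Dict, Any, Tuple
--
-- EXPECTED_TASK_NAMES = {
--     "single_label_classification",
--     "multi_label_classification",
--     "information_extraction",
--     "rule_based_transformation",
--     "extractive_qa",
-- }
--
-- def validate_minimum_instruction_diversity(
--     records: List[Dict[str, Any]],
--     min_unique_per_task: int = 4,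
-- ) -> List[str]:
--     issues = []
--     for task_name in EXPECTED_TASK_NAMES:
--         observed = len({r["instruction"] for r in records if r["task_name"] == task_name})
--         if observed < min_unique_per_task:
--             issues.append(
--                 f"instruction_diversity_too_low:{task_name}:minimum={min_unique_per_task}:observed={observed}"
--             )
--     return issues
-- ===== Notes on version B (the rewrite author's own statement) =====
-- stated objective: simpler
-- what changed: Drops the intermediate task->set-of-instructions dict entirely: B loops over the five expected task names and for each counts the distinct instructions of matching records with a set comprehension over the records, emitting the same issue strings.
-- crash fix: On records where every record has 'task_name' and all expected-task records have 'instruction' but some unexpected-task record lacks 'instruction', A raises KeyError while B returns the normal issue list (it never reads the instruction of a non-matching record). — e.g. on validate_minimum_instruction_diversity([[("task_name", "other")]], 1): A raises KeyError, B returns ["instruction_diversity_too_low:extractive_qa:minimum=1:observed=0", "instruction_diversity_too_low:information_extract…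
import Mathlib
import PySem

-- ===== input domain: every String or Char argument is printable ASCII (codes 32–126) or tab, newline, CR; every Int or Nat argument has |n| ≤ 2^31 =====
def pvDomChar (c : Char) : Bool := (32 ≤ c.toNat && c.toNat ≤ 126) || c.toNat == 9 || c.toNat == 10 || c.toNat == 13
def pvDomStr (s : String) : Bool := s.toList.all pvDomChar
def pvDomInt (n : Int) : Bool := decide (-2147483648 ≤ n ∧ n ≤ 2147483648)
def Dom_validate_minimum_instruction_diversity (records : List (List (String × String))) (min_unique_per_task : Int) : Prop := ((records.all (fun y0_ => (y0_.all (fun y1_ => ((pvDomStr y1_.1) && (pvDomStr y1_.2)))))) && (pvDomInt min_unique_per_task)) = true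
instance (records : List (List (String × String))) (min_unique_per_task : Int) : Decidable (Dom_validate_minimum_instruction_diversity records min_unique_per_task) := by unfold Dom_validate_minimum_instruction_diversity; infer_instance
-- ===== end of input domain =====

-- B replaces A's intermediate task→set-of-instructions dict by a direct per-task set
-- comprehension over the records; same issue strings, same fixed task list. Not faster, simpler.

-- One fixed enumeration of EXPECTED_TASK_NAMES, shared by both ports (CPython's set
-- iteration order is hash-seed dependent; outputs are compared as a set).
def pvTasks : List String :=
  ["extractive_qa", "information_extraction", "multi_label_classification",
   "rule_based_transformation", "single_label_classification"]

-- dict access r[k] on an association list: first match (total form; Pre_ guarantees presence)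
def pvGetD (r : List (String × String)) (k dflt : String) : String :=
  ((r.find? (fun p => p.1 == k)).map Prod.snd).getD dflt

-- the f-string, shared verbatim by both ports
def pvMsg (t : String) (m observed : Int) : String :=
  "instruction_diversity_too_low:" ++ t ++ ":minimum=" ++ PySem.Int.toStr m
    ++ ":observed=" ++ PySem.Int.toStr observed

-- ===== PORT A =====
def validate_minimum_instruction_diversity (records : List (List (String × String))) (min_unique_per_task : Int) : List String :=
  let instructions_by_task : PySem.Dict String (PySem.Set String) :=
    records.foldl
      (fun d r =>
        PySem.Dict.modify d (pvGetD r "task_name" "") PySem.Set.empty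
          (fun s => PySem.Set.add s (pvGetD r "instruction" "")))
      PySem.Dict.empty
  pvTasks.foldl
    (fun issues t =>
      let observed : Int :=
        PySem.Set.len (PySem.Dict.getD instructions_by_task t PySem.Set.empty)
      if observed < min_unique_per_task then issues ++ [pvMsg t min_unique_per_task observed]
      else issues)
    []

-- ===== PORT B =====
def validate_minimum_instruction_diversity_alt (records : List (List (String × String))) (min_unique_per_task : Int) : List String :=
  pvTasks.foldl
    (fun issues t =>
      let observed : Int :=
        PySem.Set.len (PySem.Set.ofList
          ((records.filter (fun r => pvGetD r "task_name" "" == t)).map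
            (fun r => pvGetD r "instruction" "")))
      if observed < min_unique_per_task then issues ++ [pvMsg t min_unique_per_task observed]
      else issues)
    []

-- ===== PRECONDITION & SPEC =====
-- Pre_ excludes exactly the records on which Python A raises KeyError: every record
-- (a dict) must carry both the "task_name" and the "instruction" key.
def Pre_validate_minimum_instruction_diversity (records : List (List (String × String))) (min_unique_per_task : Int) : Prop :=
  ∀ r ∈ records, (r.find? (fun p => p.1 == "task_name")).isSome
    ∧ (r.find? (fun p => p.1 == "instruction")).isSome
instance (records : List (List (String × String))) (min_unique_per_task : Int) : Decidable (Pre_validate_minimum_instruction_diversity records min_unique_per_task) := by unfold Pre_validate_minimum_instruction_diversity; infer_instance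

def pvWitness_validate_minimum_instruction_diversity : (List (List (String × String))) × Int :=
  ([[("task_name", "extractive_qa"), ("instruction", "say hi")]], 1)

-- A raises KeyError('instruction') as soon as ANY record lacks "instruction", even a record
-- of an unexpected task; B never reads the instruction of a non-matching record and returns.
def Raises_validate_minimum_instruction_diversity (records : List (List (String × String))) (min_unique_per_task : Int) : Prop :=
  (∀ r ∈ records, (r.find? (fun p => p.1 == "task_name")).isSome)
  ∧ (∀ r ∈ records, pvGetD r "task_name" "" ∈ pvTasks → (r.find? (fun p => p.1 == "instruction")).isSome)
  ∧ (∃ r ∈ records, ¬ (r.find? (fun p => p.1 == "instruction")).isSome)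
instance (records : List (List (String × String))) (min_unique_per_task : Int) : Decidable (Raises_validate_minimum_instruction_diversity records min_unique_per_task) := by unfold Raises_validate_minimum_instruction_diversity; infer_instance

def pvRaiseWitness_validate_minimum_instruction_diversity : (List (List (String × String))) × Int :=
  ([[("task_name", "other")]], 1)
def pvRaiseWitnessOut_validate_minimum_instruction_diversity : List String :=
  ["instruction_diversity_too_low:extractive_qa:minimum=1:observed=0",
   "instruction_diversity_too_low:information_extraction:minimum=1:observed=0",
   "instruction_diversity_too_low:multi_label_classification:minimum=1:observed=0",
   "instruction_diversity_too_low:rule_based_transformation:minimum=1:observed=0",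
   "instruction_diversity_too_low:single_label_classification:minimum=1:observed=0"]

def Spec_validate_minimum_instruction_diversity (records : List (List (String × String))) (min_unique_per_task : Int) (out : List String) : Prop := out = validate_minimum_instruction_diversity_alt records min_unique_per_task
instance (records : List (List (String × String))) (min_unique_per_task : Int) (out : List String) : Decidable (Spec_validate_minimum_instruction_diversity records min_unique_per_task out) := by unfold Spec_validate_minimum_instruction_diversity; infer_instance

-- ===== CLAIM (what is proved, stated in full; the proofs are below) =====
def Claim_equal_validate_minimum_instruction_diversity : Prop := ∀ (records : List (List (String × String))) (min_unique_per_task : Int), Dom_validate_minimum_instruction_diversity records min_unique_per_task → Pre_validate_minimum_instruction_diversity records min_unique_per_task → Spec_validate_minimum_instruction_diversity records min_unique_per_task (validate_minimum_instruction_diversity records min_unique_per_task)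

def Claim_raises_validate_minimum_instruction_diversity : Prop := (∀ (records : List (List (String × String))) (min_unique_per_task : Int), Dom_validate_minimum_instruction_diversity records min_unique_per_task → Raises_validate_minimum_instruction_diversity records min_unique_per_task → ¬ Pre_validate_minimum_instruction_diversity records min_unique_per_task) ∧ (Dom_validate_minimum_instruction_diversity (pvRaiseWitness_validate_minimum_instruction_diversity.1) (pvRaiseWitness_validate_minimum_instruction_diversity.2) ∧ Raises_validate_minimum_instruction_diversity (pvRaiseWitness_validate_minimum_instruction_diversity.1) (pvRaiseWitness_validate_minimum_instruction_diversity.2) ∧ validate_minimum_instruction_diversity_alt (pvRaiseWitness_validate_minimum_instruction_diversity.1) (pvRaiseWitness_validate_minimum_instruction_diversity.2) = pvRaiseWitnessOut_validate_minimum_instruction_diversity)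

-- ===== LEMMAS AND PROOFS =====

-- The set A's dict holds at key t = the set B builds by rescanning the records for t.
lemma getD_foldl_modify_filter (records : List (List (String × String))) (t : String)
    (d : PySem.Dict String (PySem.Set String)) :
    PySem.Dict.getD
      (records.foldl
        (fun d r =>
          PySem.Dict.modify d (pvGetD r "task_name" "") PySem.Set.empty
            (fun s => PySem.Set.add s (pvGetD r "instruction" "")))
        d) t PySem.Set.empty
    = (records.filter (fun r => pvGetD r "task_name" "" == t)).foldl
        (fun s r => PySem.Set.add s (pvGetD r "instruction" ""))
        (PySem.Dict.getD d t PySem.Set.empty) := by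
  induction records generalizing d with
  | nil => simp
  | cons r rs ih =>
      simp only [List.foldl_cons, List.filter_cons]
      rw [ih]
      by_cases h : pvGetD r "task_name" "" = t
      · subst h
        simp [PySem.Dict.getD_modify_self]
      · have hb : (pvGetD r "task_name" "" == t) = false := by
          simpa using h
        rw [hb]
        simp only [Bool.false_eq_true, if_false]
        rw [PySem.Dict.getD_modify_of_ne _ _ _ (Ne.symm h)]

lemma alt_observed_eq (records : List (List (String × String))) (t : String) :
    PySem.Set.ofList
      ((records.filter (fun r => pvGetD r "task_name" "" == t)).map
        (fun r => pvGetD r "instruction" ""))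
    = (records.filter (fun r => pvGetD r "task_name" "" == t)).foldl
        (fun s r => PySem.Set.add s (pvGetD r "instruction" "")) PySem.Set.empty := by
  rw [PySem.Set.ofList_eq_foldl, List.foldl_map]
  rfl

-- ===== VERDICT (by name: the statement is the Claim_ definition above) =====
theorem validate_minimum_instruction_diversity_spec : Claim_equal_validate_minimum_instruction_diversity := by
  intro records min_unique_per_task _ _
  unfold Spec_validate_minimum_instruction_diversity
  unfold validate_minimum_instruction_diversity validate_minimum_instruction_diversity_alt
  simp only [getD_foldl_modify_filter, alt_observed_eq, PySem.Dict.getD_empty]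

@[simp] theorem validate_minimum_instruction_diversity_raises : Claim_raises_validate_minimum_instruction_diversity := by
  unfold Claim_raises_validate_minimum_instruction_diversity
  refine ⟨?_, by decide⟩
  rintro records m _ ⟨-, -, r, hr, hno⟩ hpre
  exact hno (hpre r hr).2
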